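-- pv_equiv track=rewrite | github.com/pypi-data/pypi-mirror-42 | packages/alpha-factory/alpha_factory-0.3.6-py3-none-any.whl/alpha_factory/write_df.py | clean_line
-- ===== SOURCE A (Python) =====
-- def clean_line(line):
--     new_line=[]
--     start=[]
--     for i in line:
--         if (i[:7]=='input->'):
--             if (i[7:] not in start):
--                 start.append(i[7:])
--         elif i in new_line:
--             pass
--         else:
--             new_line.append(i)
--     return start,new_line
-- ===== SOURCE B (Python) =====
-- def clean_line(line):
--     # dedup by worklist shrinking: take the front element, then delete all its
--     # other occurrences from the remaining work; no membership tests anywhere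
--     def nub(xs):
--         out = []
--         while xs:
--             h = xs[0]
--             out.append(h)
--             xs = [x for x in xs[1:] if x != h]
--         return out
--     start = nub([i[7:] for i in line if i[:7] == 'input->'])
--     new_line = nub([i for i in line if i[:7] != 'input->'])
--     return start, new_line
-- ===== Notes on version B (the rewrite author's own statement) =====
-- stated objective: alternative
-- what changed: Replaces A's single interleaved loop with membership tests against the growing outputs by two staged passes (filter/map first) followed by a worklist-shrinking dedup that repeatedly emits the front element and filters all its duplicates out of the remaining work, using no membership test at all.
import Mathlib
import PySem

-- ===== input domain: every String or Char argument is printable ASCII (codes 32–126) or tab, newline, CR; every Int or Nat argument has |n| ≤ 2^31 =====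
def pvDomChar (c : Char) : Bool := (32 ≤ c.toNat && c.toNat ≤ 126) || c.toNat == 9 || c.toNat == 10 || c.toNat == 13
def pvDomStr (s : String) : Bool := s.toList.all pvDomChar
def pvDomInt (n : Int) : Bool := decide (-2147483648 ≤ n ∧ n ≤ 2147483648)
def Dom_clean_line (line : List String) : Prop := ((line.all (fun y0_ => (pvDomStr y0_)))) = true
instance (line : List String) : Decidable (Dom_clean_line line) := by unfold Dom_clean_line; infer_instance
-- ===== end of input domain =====

-- B replaces A's single interleaved loop (membership tests against the growing outputs) by
-- two staged filter/map passes followed by a worklist-shrinking dedup with no membership test.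

-- ===== PORT A =====
def clean_line (line : List String) : List String × List String :=
  let st := line.foldl (fun (acc : List String × List String) i =>
    let new_line := acc.1
    let start := acc.2
    if PySem.Str.slice i none (some 7) = "input->" then
      if PySem.Str.slice i (some 7) none ∉ start then
        (new_line, start ++ [PySem.Str.slice i (some 7) none])
      else (new_line, start)
    else if i ∈ new_line then (new_line, start)
    else (new_line ++ [i], start)) ([], [])
  (st.2, st.1)

-- ===== PORT B =====
-- Source B's 'nub' while-loop: out is the accumulator, the worklist shrinks by filtering away
-- every other occurrence of the element just emitted.
def nubGo (out : List String) (xs : List String) : List String :=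
  match xs with
  | [] => out
  | h :: t => nubGo (out ++ [h]) (t.filter (fun x => x ≠ h))
termination_by xs.length
decreasing_by
  simp only [List.length_cons, List.length_unattach]
  exact Nat.lt_succ_of_le (le_trans (List.length_filter_le _ _) (by simp))

def clean_line_alt (line : List String) : List String × List String :=
  let start := nubGo []
    ((line.filter (fun i => PySem.Str.slice i none (some 7) = "input->")).map
      (fun i => PySem.Str.slice i (some 7) none))
  let new_line := nubGo [] (line.filter (fun i => ¬ PySem.Str.slice i none (some 7) = "input->"))
  (start, new_line)

-- ===== PRECONDITION & SPEC =====
def Spec_clean_line (line : List String) (out : List String × List String) : Prop := out = clean_line_alt line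
instance (line : List String) (out : List String × List String) : Decidable (Spec_clean_line line out) := by unfold Spec_clean_line; infer_instance

-- ===== CLAIM =====
def Claim_equal_clean_line : Prop := ∀ (line : List String), Dom_clean_line line → Spec_clean_line line (clean_line line)

-- ===== LEMMAS AND PROOFS =====

-- A's loop is two Set.updates, one per output list.
theorem clean_line_loop (line : List String) (acc : List String × List String) :
    line.foldl (fun (acc : List String × List String) i =>
      if PySem.Str.slice i none (some 7) = "input->" then
        if PySem.Str.slice i (some 7) none ∉ acc.2 then
          (acc.1, acc.2 ++ [PySem.Str.slice i (some 7) none])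
        else (acc.1, acc.2)
      else if i ∈ acc.1 then (acc.1, acc.2)
      else (acc.1 ++ [i], acc.2)) acc
    = (PySem.Set.update acc.1 (line.filter (fun i => ¬ PySem.Str.slice i none (some 7) = "input->")),
       PySem.Set.update acc.2 ((line.filter (fun i => PySem.Str.slice i none (some 7) = "input->")).map
         (fun i => PySem.Str.slice i (some 7) none))) := by
  induction line generalizing acc with
  | nil => simp [PySem.Set.update]
  | cons i rest ih =>
    rw [List.foldl_cons, ih]
    by_cases h : PySem.Str.slice i none (some 7) = "input->"
    · by_cases hm : PySem.Str.slice i (some 7) none ∈ acc.2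
      · simp [h, hm, PySem.Set.update_cons]
      · simp [h, hm, PySem.Set.update_cons]
    · by_cases hm : i ∈ acc.1
      · simp [h, hm, PySem.Set.update_cons]
      · simp [h, hm, PySem.Set.update_cons]

-- Updating a set already containing h ignores all occurrences of h in the input.
theorem update_filter_ne (h : String) (s : List String) (hs : h ∈ s) (xs : List String) :
    PySem.Set.update s xs = PySem.Set.update s (xs.filter (fun x => x ≠ h)) := by
  induction xs generalizing s with
  | nil => rfl
  | cons x t ih =>
    by_cases hx : x = h
    · subst hx
      have : PySem.Set.add s x = s := by simp [PySem.Set.add, PySem.Set.contains, hs]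
      simp [PySem.Set.update_cons, this, ih s hs]
    · have hmem : h ∈ PySem.Set.add s x := by
        simp [PySem.Set.add]; split <;> simp [hs]
      simp [PySem.Set.update_cons, hx, ih _ hmem]

-- Elements of the worklist different from h pass through a leading h unchanged.
theorem update_cons_of_not_mem (h : String) (s xs : List String)
    (hx : ∀ x ∈ xs, x ≠ h) :
    PySem.Set.update (h :: s) xs = h :: PySem.Set.update s xs := by
  induction xs generalizing s with
  | nil => rfl
  | cons x t ih =>
    have hxh : x ≠ h := hx x (by simp)
    have : PySem.Set.add (h :: s) x = h :: PySem.Set.add s x := by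
      simp [PySem.Set.add, PySem.Set.contains, hxh]
      split <;> simp
    simp [PySem.Set.update_cons, this, ih _ (fun y hy => hx y (by simp [hy]))]

-- The worklist-shrinking dedup computes the ordered set of its input.
theorem ofList_cons_filter (h : String) (t : List String) :
    PySem.Set.ofList (h :: t) = h :: PySem.Set.ofList (t.filter (fun x => x ≠ h)) := by
  have h1 : PySem.Set.ofList (h :: t) = PySem.Set.update [h] t := by
    simp [PySem.Set.ofList_eq_foldl, PySem.Set.update, PySem.Set.add, PySem.Set.contains]
  rw [h1, update_filter_ne h [h] (by simp) t]
  have h2 := update_cons_of_not_mem h [] (t.filter (fun x => x ≠ h))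
    (by intro x hx; simpa using (List.of_mem_filter hx))
  simpa [PySem.Set.ofList_eq_foldl, PySem.Set.update] using h2

theorem nubGo_eq (xs : List String) (out : List String) :
    nubGo out xs = out ++ PySem.Set.ofList xs := by
  match xs with
  | [] => rw [nubGo]; simp
  | h :: t =>
    rw [nubGo, nubGo_eq (t.filter (fun x => x ≠ h)) (out ++ [h]), ofList_cons_filter]
    simp
termination_by xs.length
decreasing_by
  simp only [List.length_cons]
  exact Nat.lt_succ_of_le (List.length_filter_le _ _)

-- ===== VERDICT =====
theorem clean_line_spec : Claim_equal_clean_line := by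
  intro line _
  show clean_line line = clean_line_alt line
  simp only [clean_line, clean_line_alt, clean_line_loop]
  simp [nubGo_eq, PySem.Set.update_nil_left]
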